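-- pv_equiv track=rewrite | github.com/ryanGT/personal | parse_from_esword.py | separaterawverses
-- ===== SOURCE A (Python) =====
-- def findblanks(listin):
--     inds = []
--     for n, line in enumerate(listin):
--         if line.strip()=='':
--             inds.append(n)
--     return inds
--
-- def separaterawverses(listin):
--     biglist = []
--     myinds = findblanks(listin)
--     prevind = 0
--     for curind in myinds:
--         curraw = listin[prevind:curind]
--         biglist.append(curraw)
--         prevind = curind+1
--     biglist.append(listin[prevind:])
--     bigout = [item for item in biglist if item]
--     return bigout
-- ===== SOURCE B (Python) =====
-- def separaterawverses(listin):
--     groups = []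
--     current = []
--     for line in listin:
--         if line.strip() == '':
--             if current:
--                 groups.append(current)
--             current = []
--         else:
--             current.append(line)
--     if current:
--         groups.append(current)
--     return groups
-- ===== Notes on version B (the rewrite author's own statement) =====
-- stated objective: idiomatic
-- what changed: Replaces A's three phases (collect blank-line indices, slice between consecutive indices, filter out empty slices) with a single direct grouping pass that maintains a current-group accumulator and emits it at each blank line.
import Mathlib
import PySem

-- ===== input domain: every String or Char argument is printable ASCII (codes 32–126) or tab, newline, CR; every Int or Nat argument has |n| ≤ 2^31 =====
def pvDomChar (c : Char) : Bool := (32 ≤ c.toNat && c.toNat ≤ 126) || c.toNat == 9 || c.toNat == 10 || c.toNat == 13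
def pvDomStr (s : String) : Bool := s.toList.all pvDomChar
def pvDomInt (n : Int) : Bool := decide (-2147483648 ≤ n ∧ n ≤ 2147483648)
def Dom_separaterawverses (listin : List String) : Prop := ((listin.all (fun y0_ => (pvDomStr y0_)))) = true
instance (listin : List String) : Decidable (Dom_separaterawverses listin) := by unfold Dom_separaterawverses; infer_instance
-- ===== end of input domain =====

-- B replaces A's three phases (blank-index table, slicing, filtering empties) with one
-- direct grouping pass over the lines; same cost, simpler structure.

-- ===== PORT A =====
-- 'for n, line in enumerate(listin): if line.strip()=="": inds.append(n)'
def findblanksAux (n : Int) : List String → List Int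
  | [] => []
  | line :: rest =>
    if PySem.Str.strip line = "" then n :: findblanksAux (n + 1) rest
    else findblanksAux (n + 1) rest

def findblanks (listin : List String) : List Int := findblanksAux 0 listin

-- the 'for curind in myinds' loop with state (prevind, biglist), plus the final listin[prevind:]
def sepLoop (listin : List String) (prevind : Int) : List Int → List (List String)
  | [] => [PySem.List.slice listin (some prevind) none]
  | curind :: rest =>
    PySem.List.slice listin (some prevind) (some curind) :: sepLoop listin (curind + 1) rest

def separaterawverses (listin : List String) : List (List String) :=
  (sepLoop listin 0 (findblanks listin)).filter (fun item => !item.isEmpty)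

-- ===== PORT B =====
def sepStep (st : List (List String) × List String) (line : String) :
    List (List String) × List String :=
  if PySem.Str.strip line = "" then
    (if st.2.isEmpty then st.1 else st.1 ++ [st.2], [])
  else
    (st.1, st.2 ++ [line])

def separaterawverses_alt (listin : List String) : List (List String) :=
  let st := listin.foldl sepStep ([], [])
  if st.2.isEmpty then st.1 else st.1 ++ [st.2]

-- ===== PRECONDITION & SPEC =====
def Spec_separaterawverses (listin : List String) (out : List (List String)) : Prop := out = separaterawverses_alt listin
instance (listin : List String) (out : List (List String)) : Decidable (Spec_separaterawverses listin out) := by unfold Spec_separaterawverses; infer_instance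

-- ===== CLAIM (what is proved, stated in full; the proofs are below) =====
def Claim_equal_separaterawverses : Prop := ∀ (listin : List String), Dom_separaterawverses listin → Spec_separaterawverses listin (separaterawverses listin)

-- ===== LEMMAS AND PROOFS =====

-- (first segment, remaining segments) of the blank-separated split, empties included
def segs : List String → List String × List (List String)
  | [] => ([], [])
  | x :: xs =>
    let p := segs xs
    if PySem.Str.strip x = "" then ([], p.1 :: p.2) else (x :: p.1, p.2)

-- B's grouping pass as a front-recursion with the pending group as parameter
def gaux (cur : List String) : List String → List (List String)
  | [] => if cur.isEmpty then [] else [cur]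
  | x :: xs =>
    if PySem.Str.strip x = "" then (if cur.isEmpty then [] else [cur]) ++ gaux [] xs
    else gaux (cur ++ [x]) xs

lemma findblanksAux_shift (l : List String) (n : Int) :
    findblanksAux (n + 1) l = (findblanksAux n l).map (· + 1) := by
  induction l generalizing n with
  | nil => simp [findblanksAux]
  | cons x xs ih =>
    simp only [findblanksAux]
    split_ifs <;> simp [ih]

lemma findblanksAux_nonneg (l : List String) (n : Int) (hn : 0 ≤ n) :
    ∀ i ∈ findblanksAux n l, 0 ≤ i := by
  induction l generalizing n with
  | nil => simp [findblanksAux]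
  | cons x xs ih =>
    intro i hi
    simp only [findblanksAux] at hi
    split_ifs at hi with h
    · rcases List.mem_cons.mp hi with rfl | hi
      · exact hn
      · exact ih (n + 1) (by omega) i hi
    · exact ih (n + 1) (by omega) i hi

lemma slice_cons_succ (x : String) (xs : List String) (a b : Int) (ha : 0 ≤ a) (hb : 0 ≤ b) :
    PySem.List.slice (x :: xs) (some (a + 1)) (some (b + 1)) =
      PySem.List.slice xs (some a) (some b) := by
  rw [PySem.List.slice_toNat _ (by omega) (by omega), PySem.List.slice_toNat _ ha hb]
  have h1 : (a + 1).toNat = a.toNat + 1 := by omega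
  have h2 : (b + 1).toNat = b.toNat + 1 := by omega
  simp [h1, h2, Nat.succ_sub_succ]

lemma slice_from_cons_succ (x : String) (xs : List String) (a : Int) (ha : 0 ≤ a) :
    PySem.List.slice (x :: xs) (some (a + 1)) none = PySem.List.slice xs (some a) none := by
  rw [PySem.List.slice_from _ (by omega), PySem.List.slice_from _ ha]
  have h1 : (a + 1).toNat = a.toNat + 1 := by omega
  simp [h1]

lemma slice_zero_zero (l : List String) : PySem.List.slice l (some 0) (some 0) = [] := by
  rw [PySem.List.slice_toNat _ le_rfl le_rfl]; simp

lemma slice_cons_zero_succ (x : String) (xs : List String) (b : Int) (hb : 0 ≤ b) :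
    PySem.List.slice (x :: xs) (some 0) (some (b + 1)) =
      x :: PySem.List.slice xs (some 0) (some b) := by
  rw [PySem.List.slice_toNat _ le_rfl (by omega), PySem.List.slice_toNat _ le_rfl hb]
  have h1 : (b + 1).toNat = b.toNat + 1 := by omega
  simp [h1]

lemma sepLoop_shift (x : String) (xs : List String) (inds : List Int) (prev : Int)
    (hp : 0 ≤ prev) (hi : ∀ i ∈ inds, 0 ≤ i) :
    sepLoop (x :: xs) (prev + 1) (inds.map (· + 1)) = sepLoop xs prev inds := by
  induction inds generalizing prev with
  | nil => simp [sepLoop, slice_from_cons_succ x xs prev hp]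
  | cons i rest ih =>
    have hi0 : 0 ≤ i := hi i (List.mem_cons_self ..)
    simp only [List.map_cons, sepLoop]
    rw [slice_cons_succ x xs prev i hp hi0,
        ih (i + 1) (by omega) (fun j hj => hi j (List.mem_cons_of_mem _ hj))]

lemma sepLoop_segs (l : List String) :
    sepLoop l 0 (findblanks l) = (segs l).1 :: (segs l).2 := by
  induction l with
  | nil =>
    simp [findblanks, findblanksAux, sepLoop, segs, PySem.List.slice_from _ le_rfl]
  | cons x xs ih =>
    have hfb : findblanksAux 1 xs = (findblanks xs).map (· + 1) := by
      have := findblanksAux_shift xs 0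
      simpa [findblanks] using this
    have hnn : ∀ i ∈ findblanks xs, 0 ≤ i := findblanksAux_nonneg xs 0 le_rfl
    by_cases hx : PySem.Str.strip x = ""
    · have : findblanks (x :: xs) = 0 :: (findblanks xs).map (· + 1) := by
        simp [findblanks, findblanksAux, hx, hfb]
      rw [this]
      simp only [sepLoop]
      rw [slice_zero_zero]
      rw [sepLoop_shift x xs (findblanks xs) 0 le_rfl hnn, ih]
      simp [segs, hx]
    · have : findblanks (x :: xs) = (findblanks xs).map (· + 1) := by
        simp [findblanks, findblanksAux, hx, hfb]
      rw [this]
      cases hc : findblanks xs with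
      | nil =>
        rw [hc] at ih
        simp only [sepLoop, List.map_nil] at ih ⊢
        rw [PySem.List.slice_from _ le_rfl] at ih ⊢
        simp only [Int.toNat_zero, List.drop_zero] at ih ⊢
        obtain ⟨h1, h2⟩ := List.cons_eq_cons.mp ih.symm
        simp [segs, hx, h1, h2]
      | cons i rest =>
        rw [hc] at ih
        have hi0 : 0 ≤ i := hnn i (hc ▸ List.mem_cons_self ..)
        have hrest : ∀ j ∈ rest, 0 ≤ j := fun j hj => hnn j (hc ▸ List.mem_cons_of_mem _ hj)
        simp only [sepLoop, List.map_cons] at ih ⊢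
        have h1 : PySem.List.slice xs (some 0) (some i) = (segs xs).1 :=
          (List.cons_eq_cons.mp ih).1
        have h2 : sepLoop xs (i + 1) rest = (segs xs).2 := (List.cons_eq_cons.mp ih).2
        rw [slice_cons_zero_succ x xs i hi0, h1,
            show i + 1 + 1 = (i + 1) + 1 by ring,
            sepLoop_shift x xs rest (i + 1) (by omega) hrest, h2]
        simp [segs, hx]

lemma foldl_sepStep (l : List String) (out : List (List String)) (cur : List String) :
    (if (l.foldl sepStep (out, cur)).2.isEmpty then (l.foldl sepStep (out, cur)).1
      else (l.foldl sepStep (out, cur)).1 ++ [(l.foldl sepStep (out, cur)).2]) =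
      out ++ gaux cur l := by
  induction l generalizing out cur with
  | nil => simp only [List.foldl_nil, gaux]; split_ifs <;> simp
  | cons x xs ih =>
    by_cases hx : PySem.Str.strip x = ""
    · by_cases hc : cur.isEmpty
      · have hstep : sepStep (out, cur) x = (out, []) := by simp [sepStep, hx, hc]
        rw [List.foldl_cons, hstep, ih out []]
        simp [gaux, hx, hc]
      · have hstep : sepStep (out, cur) x = (out ++ [cur], []) := by simp [sepStep, hx, hc]
        rw [List.foldl_cons, hstep, ih (out ++ [cur]) []]
        simp [gaux, hx, hc, List.append_assoc]
    · have hstep : sepStep (out, cur) x = (out, cur ++ [x]) := by simp [sepStep, hx]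
      rw [List.foldl_cons, hstep, ih out (cur ++ [x])]
      simp [gaux, hx]

lemma gaux_segs (l : List String) (cur : List String) :
    gaux cur l =
      (if (cur ++ (segs l).1).isEmpty then [] else [cur ++ (segs l).1]) ++
        ((segs l).2).filter (fun s => !s.isEmpty) := by
  induction l generalizing cur with
  | nil => simp [gaux, segs]
  | cons x xs ih =>
    by_cases hx : PySem.Str.strip x = ""
    · simp only [gaux, hx, if_pos, segs]
      rw [ih []]
      simp only [List.nil_append]
      simp only [List.filter_cons]
      by_cases hc : cur.isEmpty <;> by_cases hs : (segs xs).1.isEmpty <;>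
        simp [hc, hs]
    · simp only [gaux, hx, segs, ite_false]
      rw [ih (cur ++ [x])]
      have hne : ((cur ++ [x]) ++ (segs xs).1).isEmpty = false := by
        simp
      have hne2 : (cur ++ x :: (segs xs).1).isEmpty = false := by
        simp
      simp [hne2, List.append_assoc]

-- ===== VERDICT (by name: the statement is the Claim_ definition above) =====
theorem separaterawverses_spec : Claim_equal_separaterawverses := by
  intro listin _
  unfold Spec_separaterawverses separaterawverses separaterawverses_alt
  rw [sepLoop_segs]
  have hb := foldl_sepStep listin [] []
  simp only [List.nil_append] at hb
  rw [hb, gaux_segs]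
  simp only [List.filter_cons, List.nil_append]
  split_ifs <;> simp_all
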